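-- pv_equiv track=rewrite | github.com/Imagination00/Projet-Binaire | Projet Base/logic.py | expliquer_conversion_positionnelle
-- ===== SOURCE A (Python) =====
-- CHIFFRES = "0123456789ABCDEF"
--
-- def chiffre_vers_valeur(caractere):
--     """
--     Transforme un chiffre écrit ('0' à 'F') en valeur numérique.
--
--     Paramètres:
--         caractere (str): Un caractère représentant un chiffre hexadécimal ('0' à 'F', majuscule ou minuscule).
--
--     Retourne:
--         int: La valeur numérique du caractère (0 à 15), ou -1 si le caractère n'est pas un chiffre valide.
--     """
--     return CHIFFRES.find(caractere.upper())
--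
-- def convertir_vers_decimal(valeur, base):
--     """
--     Convertit un nombre écrit dans une base donnée en un entier en base 10
--     en utilisant la décomposition en puissances de la base.
--
--     Paramètres :
--     - valeur (str) : nombre à convertir.
--     - base (int) : base du nombre (entre 2 et 16).
--
--     Retour :
--     - int : valeur du nombre en base 10.
--     """
--     if valeur == 0:
--         return "0"
--
--     resultat = 0
--     chiffres = valeur.upper()
--     puissance = len(chiffres) - 1
--
--     for chiffre in chiffres:
--         resultat += chiffre_vers_valeur(chiffre) * (base ** puissance)
--         puissance -= 1
--
--     return resultat
--
-- def expliquer_conversion_positionnelle(valeur, base):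
--     """
--     Génère une explication textuelle de la conversion
--     d'un nombre vers le décimal par décomposition positionnelle.
--
--     Paramètres :
--     - valeur (str) : nombre à convertir.
--     - base (int) : base du nombre.
--
--     Retour :
--     - list[str] : phrases expliquant le calcul.
--     """
--     termes = []
--     chiffres = valeur.upper()
--
--     for i, chiffre in enumerate(chiffres):
--         puissance = len(chiffres) - 1 - i
--         v = chiffre_vers_valeur(chiffre)
--         termes.append(f"{v} × {base}^{puissance}")
--
--     decimal = convertir_vers_decimal(valeur, base)
--
--     return [
--         f"On écrit {valeur} comme une somme de puissances de {base}.",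
--         " + ".join(termes) + f" = {decimal}"
--     ]
-- ===== SOURCE B (Python) =====
-- CHIFFRES = "0123456789ABCDEF"
--
-- def chiffre_vers_valeur(caractere):
--     return CHIFFRES.find(caractere.upper())
--
-- def expliquer_conversion_positionnelle(valeur, base):
--     vals = [chiffre_vers_valeur(c) for c in valeur.upper()]
--     n = len(vals)
--     termes = [f"{v} \u00d7 {base}^{n - 1 - i}" for i, v in enumerate(vals)]
--     decimal = 0
--     for v in vals:
--         decimal = decimal * base + v
--     return [
--         f"On \u00e9crit {valeur} comme une somme de puissances de {base}.",
--         " + ".join(termes) + f" = {decimal}",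
--     ]
-- ===== Notes on version B (the rewrite author's own statement) =====
-- stated objective: faster
-- what changed: B computes the digit values once into a list, builds the term strings by mapping over that list, and replaces the power-sum helper convertir_vers_decimal (which recomputes base**puissance per digit) by a single Horner fold acc = acc*base + v.
import Mathlib
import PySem

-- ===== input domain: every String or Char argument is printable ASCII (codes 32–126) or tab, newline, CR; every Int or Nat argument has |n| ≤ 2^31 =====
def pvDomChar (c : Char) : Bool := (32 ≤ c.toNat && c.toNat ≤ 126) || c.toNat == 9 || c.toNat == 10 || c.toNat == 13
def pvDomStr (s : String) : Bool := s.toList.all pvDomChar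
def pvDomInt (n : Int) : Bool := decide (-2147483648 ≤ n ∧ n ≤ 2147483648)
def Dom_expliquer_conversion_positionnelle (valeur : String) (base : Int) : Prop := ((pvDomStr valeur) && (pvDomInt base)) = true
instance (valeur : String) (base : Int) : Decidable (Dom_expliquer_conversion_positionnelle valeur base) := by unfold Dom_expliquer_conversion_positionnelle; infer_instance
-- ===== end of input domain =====

-- B precomputes the digit values once and replaces A's per-digit base**puissance power
-- sum by a single Horner fold (objective: alternative decomposition, same return value).

-- ===== PORT A =====
-- chiffre_vers_valeur(caractere) = CHIFFRES.find(caractere.upper())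
def chiffreVersValeur (caractere : String) : Int :=
  PySem.Str.find "0123456789ABCDEF" (PySem.Str.upper caractere)

-- convertir_vers_decimal. The Python branch `if valeur == 0` compares a str with the
-- int 0 and is always False, so it is omitted. The exponent `puissance` is ≥ 0 at every
-- use (it starts at len-1 and is decremented once per character), so porting Python's
-- ** as `base ^ p.toNat` is exact on every reachable state.
def convertirVersDecimal (valeur : String) (base : Int) : Int :=
  let chiffres := PySem.Str.upper valeur
  (chiffres.toList.foldl
    (fun (st : Int × Int) chiffre =>
      (st.1 + chiffreVersValeur (String.ofList [chiffre]) * base ^ st.2.toNat, st.2 - 1))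
    (0, PySem.Str.len chiffres - 1)).1

def expliquer_conversion_positionnelle (valeur : String) (base : Int) : List String :=
  let chiffres := PySem.Str.upper valeur
  let termes := (PySem.List.enumerate chiffres.toList).foldl
    (fun (ts : List String) ic =>
      let puissance := PySem.Str.len chiffres - 1 - ic.1
      let v := chiffreVersValeur (String.ofList [ic.2])
      ts ++ [PySem.Int.toStr v ++ " × " ++ PySem.Int.toStr base ++ "^" ++ PySem.Int.toStr puissance]) []
  let decimal := convertirVersDecimal valeur base
  ["On écrit " ++ valeur ++ " comme une somme de puissances de " ++ PySem.Int.toStr base ++ ".",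
   PySem.Str.join " + " termes ++ " = " ++ PySem.Int.toStr decimal]

-- ===== PORT B =====
def expliquer_conversion_positionnelle_alt (valeur : String) (base : Int) : List String :=
  let vals := (PySem.Str.upper valeur).toList.map (fun c => chiffreVersValeur (String.ofList [c]))
  let n : Int := vals.length
  let termes := (PySem.List.enumerate vals).map
    (fun iv => PySem.Int.toStr iv.2 ++ " × " ++ PySem.Int.toStr base ++ "^" ++ PySem.Int.toStr (n - 1 - iv.1))
  let decimal := vals.foldl (fun a v => a * base + v) 0
  ["On écrit " ++ valeur ++ " comme une somme de puissances de " ++ PySem.Int.toStr base ++ ".",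
   PySem.Str.join " + " termes ++ " = " ++ PySem.Int.toStr decimal]

-- ===== PRECONDITION & SPEC =====
def Spec_expliquer_conversion_positionnelle (valeur : String) (base : Int) (out : List String) : Prop := out = expliquer_conversion_positionnelle_alt valeur base
instance (valeur : String) (base : Int) (out : List String) : Decidable (Spec_expliquer_conversion_positionnelle valeur base out) := by unfold Spec_expliquer_conversion_positionnelle; infer_instance

-- ===== CLAIM (what is proved, stated in full; the proofs are below) =====
def Claim_equal_expliquer_conversion_positionnelle : Prop := ∀ (valeur : String) (base : Int), Dom_expliquer_conversion_positionnelle valeur base → Spec_expliquer_conversion_positionnelle valeur base (expliquer_conversion_positionnelle valeur base)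

-- ===== LEMMAS AND PROOFS =====

-- enumerate commutes with map
theorem enumerate_map {α β : Type} (f : α → β) (l : List α) (s : Int) :
    PySem.List.enumerate (l.map f) s = (PySem.List.enumerate l s).map (fun p => (p.1, f p.2)) := by
  induction l generalizing s with
  | nil => rfl
  | cons x t ih => simp [PySem.List.enumerate_cons, ih]

-- shifting the accumulator of a Horner fold
theorem horner_shift (base : Int) (l : List Int) (a b : Int) :
    l.foldl (fun x v => x * base + v) (a + b) =
      a * base ^ l.length + l.foldl (fun x v => x * base + v) b := by
  induction l generalizing a b with
  | nil => simp
  | cons v t ih =>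
    simp only [List.foldl_cons, List.length_cons]
    have h : (a + b) * base + v = a * base + (b * base + v) := by ring
    rw [h, ih]
    ring_nf

-- A's descending-power sum loop equals B's Horner fold
theorem powsum_eq_horner (base : Int) (l : List Int) (r : Int) :
    (l.foldl (fun (st : Int × Int) v => (st.1 + v * base ^ st.2.toNat, st.2 - 1))
      (r, (l.length : Int) - 1)).1 =
      r + l.foldl (fun x v => x * base + v) 0 := by
  induction l generalizing r with
  | nil => simp
  | cons v t ih =>
    simp only [List.foldl_cons, List.length_cons]
    have h1 : ((t.length + 1 : Nat) : Int) - 1 = (t.length : Int) := by push_cast; ring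
    rw [h1]
    have h2 : ((t.length : Int)).toNat = t.length := by omega
    rw [h2, ih]
    have h3 : t.foldl (fun x v => x * base + v) (0 * base + v) =
        v * base ^ t.length + t.foldl (fun x v => x * base + v) 0 := by
      rw [show (0 : Int) * base + v = v + 0 by ring]
      simpa using horner_shift base t v 0
    rw [h3]
    ring

-- A's convertir_vers_decimal computes B's Horner value on the precomputed digit list
theorem decimal_eq (valeur : String) (base : Int) :
    convertirVersDecimal valeur base =
      (((PySem.Str.upper valeur).toList.map (fun c => chiffreVersValeur (String.ofList [c]))).foldl
        (fun a v => a * base + v) 0) := by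
  show ((PySem.Str.upper valeur).toList.foldl
      (fun (st : Int × Int) chiffre =>
        (st.1 + chiffreVersValeur (String.ofList [chiffre]) * base ^ st.2.toNat, st.2 - 1))
      (0, PySem.Str.len (PySem.Str.upper valeur) - 1)).1 = _
  rw [show PySem.Str.len (PySem.Str.upper valeur) =
      ((((PySem.Str.upper valeur).toList.map (fun c => chiffreVersValeur (String.ofList [c]))).length : Int))
    from by simp [PySem.Str.len_eq]]
  rw [show ((PySem.Str.upper valeur).toList.foldl
      (fun (st : Int × Int) chiffre =>
        (st.1 + chiffreVersValeur (String.ofList [chiffre]) * base ^ st.2.toNat, st.2 - 1))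
      (0, (((PySem.Str.upper valeur).toList.map (fun c => chiffreVersValeur (String.ofList [c]))).length : Int) - 1)) =
    (((PySem.Str.upper valeur).toList.map (fun c => chiffreVersValeur (String.ofList [c]))).foldl
      (fun (st : Int × Int) v => (st.1 + v * base ^ st.2.toNat, st.2 - 1))
      (0, (((PySem.Str.upper valeur).toList.map (fun c => chiffreVersValeur (String.ofList [c]))).length : Int) - 1))
    from by rw [List.foldl_map]]
  rw [powsum_eq_horner]
  simp

-- ===== VERDICT (by name: the statement is the Claim_ definition above) =====
theorem expliquer_conversion_positionnelle_spec : Claim_equal_expliquer_conversion_positionnelle := by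
  intro valeur base _
  unfold Spec_expliquer_conversion_positionnelle
  unfold expliquer_conversion_positionnelle expliquer_conversion_positionnelle_alt
  simp only [PySem.List.foldl_append_singleton_eq_map, List.nil_append, enumerate_map,
    List.map_map, List.length_map, PySem.Str.len_eq, decimal_eq, Function.comp_def]
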